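-- pv_equiv track=rewrite | github.com/jddelrioisaza/lenguajes-formales-python | Proyecto/Alfabeto.py | __comprobar
-- ===== SOURCE A (Python) =====
-- def __comprobar(palabra):
--
--     bandera = False
--
--     for letra in palabra:
--
--             if letra != "#":
--
--                 bandera = True
--
--     if (bandera == True):
--
--         palabra = palabra.replace("#", "")
--
--     else:
--
--         palabra = "#"
--
--     return palabra
-- ===== SOURCE B (Python) =====
-- def __comprobar(palabra):
--     kept = []
--     for ch in palabra:
--         if ch != "#":
--             kept.append(ch)
--     return "".join(kept) or "#"
-- ===== Notes on version B (the rewrite author's own statement) =====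
-- stated objective: simpler
-- what changed: Replaces A's two staged passes (a flag-setting scan followed by str.replace) with one filtering pass that accumulates the non-'#' characters and returns the sentinel '#' only if nothing was kept; the flag and the replace call disappear.
import Mathlib
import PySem

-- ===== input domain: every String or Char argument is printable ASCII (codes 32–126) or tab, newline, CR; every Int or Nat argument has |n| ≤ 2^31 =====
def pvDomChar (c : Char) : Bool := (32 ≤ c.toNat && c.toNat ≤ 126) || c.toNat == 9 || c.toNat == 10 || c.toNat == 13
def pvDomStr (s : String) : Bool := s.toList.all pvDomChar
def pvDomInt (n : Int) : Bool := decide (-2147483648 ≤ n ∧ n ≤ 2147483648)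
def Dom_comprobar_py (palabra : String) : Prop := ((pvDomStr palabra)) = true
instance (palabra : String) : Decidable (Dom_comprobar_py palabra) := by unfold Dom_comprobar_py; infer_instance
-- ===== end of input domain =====

-- B replaces A's staged flag-scan + str.replace by one filtering pass with an accumulator (objective: simpler).

-- ===== PORT A =====
def comprobar_py (palabra : String) : String :=
  let bandera := palabra.toList.foldl (fun b letra => if letra ≠ '#' then true else b) false
  if bandera = true then PySem.Str.replace palabra "#" "" else "#"

-- ===== PORT B =====
def comprobar_py_alt (palabra : String) : String :=
  let kept := palabra.toList.foldl (fun acc ch => if ch ≠ '#' then acc ++ [ch] else acc) []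
  let joined := String.ofList kept
  if joined = "" then "#" else joined

-- ===== PRECONDITION & SPEC =====
def Spec_comprobar_py (palabra : String) (out : String) : Prop := out = comprobar_py_alt palabra
instance (palabra : String) (out : String) : Decidable (Spec_comprobar_py palabra out) := by unfold Spec_comprobar_py; infer_instance

-- ===== CLAIM (what is proved, stated in full; the proofs are below) =====
def Claim_equal_comprobar_py : Prop := ∀ (palabra : String), Dom_comprobar_py palabra → Spec_comprobar_py palabra (comprobar_py palabra)

-- ===== LEMMAS AND PROOFS =====

theorem pv_flag_fold (l : List Char) (b : Bool) :
    l.foldl (fun b letra => if letra ≠ '#' then true else b) b = (b || l.any (· ≠ '#')) := by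
  induction l generalizing b with
  | nil => simp
  | cons c t ih =>
    simp only [List.foldl_cons, List.any_cons, ih]
    by_cases h : c = '#' <;> simp [h]

theorem pv_kept_filter (l acc : List Char) :
    l.foldl (fun acc ch => if ch ≠ '#' then acc ++ [ch] else acc) acc
      = acc ++ l.filter (· ≠ '#') := by
  induction l generalizing acc with
  | nil => simp
  | cons c t ih =>
    simp only [List.foldl_cons, List.filter_cons, ih]
    by_cases h : c = '#' <;> simp [h]

theorem pv_replace_go_filter (l acc : List Char) :
    PySem.Chars.replace.go ['#'] [] l.length l acc = acc.reverse ++ l.filter (· ≠ '#') := by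
  induction l generalizing acc with
  | nil => simp [PySem.Chars.replace.go]
  | cons c t ih =>
    rw [List.length_cons, PySem.Chars.replace.go]
    by_cases h : c = '#'
    · simp [h, List.isPrefixOf, ih]
    · have hp : List.isPrefixOf ['#'] (c :: t) = false := by
        simp only [List.isPrefixOf, Bool.and_true, beq_eq_false_iff_ne]
        exact fun he => h he.symm
      simp [hp, ih, h]

theorem pv_replace_filter (s : String) :
    (PySem.Str.replace s "#" "").toList = s.toList.filter (· ≠ '#') := by
  rw [PySem.Str.toList_replace]
  show PySem.Chars.replace s.toList ['#'] [] = _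
  rw [PySem.Chars.replace]
  have h := pv_replace_go_filter s.toList []
  simpa using h

-- ===== VERDICT (by name: the statement is the Claim_ definition above) =====
theorem comprobar_py_spec : Claim_equal_comprobar_py := by
  intro palabra _
  unfold Spec_comprobar_py comprobar_py comprobar_py_alt
  simp only [pv_flag_fold, Bool.false_or, pv_kept_filter, List.nil_append]
  by_cases h : palabra.toList.any (· ≠ '#') = true
  · have hne : String.ofList (palabra.toList.filter (· ≠ '#')) ≠ "" := by
      intro he
      have hl : palabra.toList.filter (· ≠ '#') = [] := by
        have := congrArg String.toList he; simpa using this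
      obtain ⟨c, hc, hcne⟩ := List.any_eq_true.mp h
      have : c ∈ ([] : List Char) := hl ▸ List.mem_filter.mpr ⟨hc, hcne⟩
      simp at this
    rw [if_pos h, if_neg hne]
    apply String.toList_inj.mp
    rw [pv_replace_filter]
    simp
  · have hempty : String.ofList (palabra.toList.filter (· ≠ '#')) = "" := by
      apply String.toList_inj.mp
      simp only [String.toList_ofList, String.toList_empty, List.filter_eq_nil_iff]
      intro c hc
      by_contra hcne
      exact h (List.any_eq_true.mpr ⟨c, hc, by simpa using hcne⟩)
    rw [if_neg h, if_pos hempty]
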